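-- pv_equiv track=rewrite | github.com/SeungjaeLim/Problem-Solving | 프로그래머스/2/42626. 더 맵게/더 맵게.py | solution
-- ===== SOURCE A (Python) =====
-- import heapq
--
-- def solution(scoville, K):
--     heapq.heapify(scoville)
--     m1 = scoville[0]
--     answer = 0
--     while m1 < K and len(scoville) > 1:
--         m1 = heapq.heappop(scoville)
--         m2 = heapq.heappop(scoville)
--         heapq.heappush(scoville, m1 + 2 * m2)
--         answer += 1
--         m1 = scoville[0]
--         if len(scoville) == 1:
--             break
--     if m1 < K:
--         return -1
--     else:
--         return answer
-- ===== SOURCE B (Python) =====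
-- def solution(scoville, K):
--     # Sorted-list strategy instead of a heap: sort once, pop the two front
--     # elements, insert the mix back at its sorted position (linear scan).
--     # Works on a copy; A mutates its argument, B does not.
--     s = sorted(scoville)
--     answer = 0
--     while s[0] < K and len(s) > 1:
--         m1 = s.pop(0)
--         m2 = s.pop(0)
--         c = m1 + 2 * m2
--         i = 0
--         while i < len(s) and s[i] < c:
--             i += 1
--         s.insert(i, c)
--         answer += 1
--     return -1 if s[0] < K else answer
-- ===== Notes on version B (the rewrite author's own statement) =====
-- stated objective: alternative
-- what changed: Replaces the binary heap (heapify/heappop/heappush) by a sorted list built once with sorted() and maintained by popping the two front elements and re-inserting the mix at its sorted position via a linear scan.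
import Mathlib
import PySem

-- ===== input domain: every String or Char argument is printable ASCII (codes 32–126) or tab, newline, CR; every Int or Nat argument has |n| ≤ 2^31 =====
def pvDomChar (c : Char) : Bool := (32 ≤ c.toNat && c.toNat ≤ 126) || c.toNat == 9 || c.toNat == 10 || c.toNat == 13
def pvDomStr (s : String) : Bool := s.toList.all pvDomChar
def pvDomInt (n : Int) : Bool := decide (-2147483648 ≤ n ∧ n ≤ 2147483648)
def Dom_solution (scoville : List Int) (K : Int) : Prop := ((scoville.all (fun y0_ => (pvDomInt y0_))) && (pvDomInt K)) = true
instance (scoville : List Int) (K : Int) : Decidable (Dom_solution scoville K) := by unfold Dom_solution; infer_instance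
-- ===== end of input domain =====

-- B replaces A's binary heap by a sorted list maintained by positional insertion;
-- equivalence is about the RETURN value only (A mutates its argument in place, B works on a copy).

-- ===== PORT A =====
-- heapq is modelled by its observable semantics on the multiset of elements:
-- scoville[0] / heappop read and remove the minimum value, heappush adds a value.
def heapMin (h : List Int) : Int := (PySem.List.min? h (fun x => x)).getD 0

theorem heapMin_mem {h : List Int} (hne : h ≠ []) : heapMin h ∈ h := by
  cases hm : PySem.List.min? h (fun x : Int => x) with
  | none => exact absurd ((PySem.List.min?_eq_none_iff h _).mp hm) hne
  | some m =>
    have hmem := PySem.List.min?_mem hm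
    simpa [heapMin, hm] using hmem

theorem heapStep_len {h : List Int} (c : Int) (hl : 1 < h.length) :
    ((h.erase (heapMin h)).erase (heapMin (h.erase (heapMin h))) ++ [c]).length < h.length := by
  have hne : h ≠ [] := by intro e; simp [e] at hl
  have e1 : (h.erase (heapMin h)).length = h.length - 1 :=
    List.length_erase_of_mem (heapMin_mem hne)
  have hne2 : h.erase (heapMin h) ≠ [] := by
    intro e; rw [e] at e1; simp at e1; omega
  have e2 := List.length_erase_of_mem (heapMin_mem hne2)
  simp [e2, e1]
  omega

-- the while-loop of A (heap state, K, answer); pop-min, pop-min, push the mix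
def solutionGo (h : List Int) (K : Int) (answer : Int) : Int :=
  if hc : 1 < h.length ∧ heapMin h < K then
    solutionGo ((h.erase (heapMin h)).erase (heapMin (h.erase (heapMin h)))
        ++ [heapMin h + 2 * heapMin (h.erase (heapMin h))]) K (answer + 1)
  else if heapMin h < K then -1 else answer
termination_by h.length
decreasing_by
  exact heapStep_len _ hc.1

def solution (scoville : List Int) (K : Int) : Int := solutionGo scoville K 0

-- ===== PORT B =====
-- insert c before the first element not < c (Source B's inner scan + insert)
def insSorted (c : Int) : List Int → List Int
  | [] => [c]
  | x :: xs => if x < c then x :: insSorted c xs else c :: x :: xs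

theorem insSorted_length (c : Int) (l : List Int) : (insSorted c l).length = l.length + 1 := by
  induction l with
  | nil => simp [insSorted]
  | cons x xs ih => by_cases h : x < c <;> simp [insSorted, h, ih]

def solutionAltGo (s : List Int) (K : Int) (answer : Int) : Int :=
  match s with
  | [] => -1  -- unreachable under Pre_solution (s[0] raises IndexError in Python)
  | [x] => if x < K then -1 else answer
  | m1 :: m2 :: rest =>
    if m1 < K then solutionAltGo (insSorted (m1 + 2 * m2) rest) K (answer + 1)
    else answer
termination_by s.length
decreasing_by
  simp [insSorted_length]

def solution_alt (scoville : List Int) (K : Int) : Int :=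
  solutionAltGo (PySem.List.sorted scoville (fun x => x) false) K 0

-- ===== PRECONDITION & SPEC =====
-- Pre_ excludes the empty list, on which both Pythons raise IndexError (scoville[0] / s[0]).
def Pre_solution (scoville : List Int) (K : Int) : Prop := scoville ≠ []
instance (scoville : List Int) (K : Int) : Decidable (Pre_solution scoville K) := by unfold Pre_solution; infer_instance
def pvWitness_solution : List Int × Int := ([1, 2, 3, 9, 10, 12], 7)

def Spec_solution (scoville : List Int) (K : Int) (out : Int) : Prop := out = solution_alt scoville K
instance (scoville : List Int) (K : Int) (out : Int) : Decidable (Spec_solution scoville K out) := by unfold Spec_solution; infer_instance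

-- ===== CLAIM (what is proved, stated in full; the proofs are below) =====
def Claim_equal_solution : Prop := ∀ (scoville : List Int) (K : Int), Dom_solution scoville K → Pre_solution scoville K → Spec_solution scoville K (solution scoville K)

-- ===== LEMMAS AND PROOFS =====

theorem insSorted_perm (c : Int) (l : List Int) : (insSorted c l).Perm (c :: l) := by
  induction l with
  | nil => simp [insSorted]
  | cons x xs ih =>
    by_cases h : x < c
    · simp only [insSorted, if_pos h]
      exact (ih.cons x).trans (List.Perm.swap c x xs)
    · simp [insSorted, h]

theorem insSorted_sorted {c : Int} {l : List Int} (h : l.Pairwise (· ≤ ·)) :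
    (insSorted c l).Pairwise (· ≤ ·) := by
  induction l with
  | nil => simp [insSorted]
  | cons x xs ih =>
    rw [List.pairwise_cons] at h
    by_cases hx : x < c
    · simp only [insSorted, if_pos hx]
      rw [List.pairwise_cons]
      refine ⟨?_, ih h.2⟩
      intro b hb
      rcases List.mem_cons.mp ((insSorted_perm c xs).mem_iff.mp hb) with rfl | hb'
      · exact le_of_lt hx
      · exact h.1 b hb'
    · simp only [insSorted, if_neg hx]
      rw [List.pairwise_cons]
      refine ⟨?_, by rw [List.pairwise_cons]; exact h⟩
      intro b hb
      rcases List.mem_cons.mp hb with rfl | hb'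
      · omega
      · exact le_trans (by omega) (h.1 b hb')

theorem heapMin_of_perm_sorted {h : List Int} {m : Int} {t : List Int}
    (hp : h.Perm (m :: t)) (hs : (m :: t).Pairwise (· ≤ ·)) : heapMin h = m := by
  have hne : h ≠ [] := by
    intro e; rw [e] at hp; exact absurd hp.symm (by simp)
  cases hm : PySem.List.min? h (fun x : Int => x) with
  | none => exact absurd ((PySem.List.min?_eq_none_iff h _).mp hm) hne
  | some v =>
    have hvmem : v ∈ h := PySem.List.min?_mem hm
    have hvmin : ∀ y ∈ h, v ≤ y := by
      intro y hy
      simpa using PySem.List.min?_isMin hm y hy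
    have h1 : v ≤ m := hvmin m (hp.mem_iff.mpr (by simp))
    have h2 : m ≤ v := by
      rcases List.mem_cons.mp (hp.mem_iff.mp hvmem) with rfl | hv''
      · exact le_refl _
      · exact (List.pairwise_cons.mp hs).1 v hv''
    have : v = m := le_antisymm h1 h2
    simp [heapMin, hm, this]

-- core invariant: A's heap loop agrees with B's sorted-list loop on any
-- permutation-equal sorted state
theorem go_eq (n : Nat) : ∀ (h s : List Int) (K answer : Int),
    h.length ≤ n → h.Perm s → s.Pairwise (· ≤ ·) → h ≠ [] →
    solutionGo h K answer = solutionAltGo s K answer := by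
  induction n with
  | zero =>
    intro h s K answer hn _ _ hne
    have h0 : h.length = 0 := Nat.le_zero.mp hn
    exact absurd (List.length_eq_zero_iff.mp h0) hne
  | succ n ih =>
    intro h s K answer hn hp hs hne
    match s with
    | [] => exact absurd hp.eq_nil hne
    | [x] =>
      have hx : h = [x] := List.perm_singleton.mp hp
      subst hx
      have hm : heapMin [x] = x := heapMin_of_perm_sorted (List.Perm.refl _) hs
      rw [solutionGo, solutionAltGo]
      simp [hm]
    | m1 :: m2 :: rest =>
      have hlen : h.length = rest.length + 2 := by simpa using hp.length_eq
      have hm1 : heapMin h = m1 := heapMin_of_perm_sorted hp hs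
      rw [solutionGo, solutionAltGo]
      by_cases hk : m1 < K
      · have hc : 1 < h.length ∧ heapMin h < K := ⟨by omega, by rw [hm1]; exact hk⟩
        rw [dif_pos hc, if_pos hk]
        have hp1 : (h.erase (heapMin h)).Perm (m2 :: rest) := by
          rw [hm1]
          simpa using hp.erase m1
        have hs1 : (m2 :: rest).Pairwise (· ≤ ·) := (List.pairwise_cons.mp hs).2
        have hm2 : heapMin (h.erase (heapMin h)) = m2 := heapMin_of_perm_sorted hp1 hs1
        rw [hm1] at hm2
        rw [hm1, hm2]
        have e1 : ((h.erase m1).erase m2).Perm rest := by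
          have := hp1.erase m2
          rw [hm1] at this
          simpa using this
        have hp2 : ((h.erase m1).erase m2 ++ [m1 + 2 * m2]).Perm (insSorted (m1 + 2 * m2) rest) :=
          ((e1.append_right [m1 + 2 * m2]).trans
            (List.perm_append_singleton _ rest)).trans
            (insSorted_perm _ rest).symm
        have hs2 : (insSorted (m1 + 2 * m2) rest).Pairwise (· ≤ ·) :=
          insSorted_sorted (List.pairwise_cons.mp hs1).2
        have hlen2 : ((h.erase m1).erase m2 ++ [m1 + 2 * m2]).length ≤ n := by
          have := hp2.length_eq
          rw [insSorted_length] at this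
          have := e1.length_eq
          omega
        exact ih _ _ K (answer + 1) hlen2 hp2 hs2 (by simp)
      · have hc : ¬ (1 < h.length ∧ heapMin h < K) := by
          rw [hm1]; tauto
        rw [dif_neg hc, if_neg (by rw [hm1]; exact hk), if_neg hk]

-- ===== VERDICT (by name: the statement is the Claim_ definition above) =====
theorem solution_spec : Claim_equal_solution := by
  intro scoville K _ hpre
  unfold Spec_solution solution solution_alt
  exact go_eq scoville.length scoville _ K 0 le_rfl
    (PySem.List.sorted_perm scoville (fun x => x) false).symm
    (by
      have := PySem.List.sorted_pairwise (xs := scoville) (key := fun x : Int => x)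
      simpa using this)
    hpre
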